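-- pv_equiv track=rewrite | github.com/QUT-Motorsport/QUTMS_Driverless | src/perception/lidar_pipeline_3/lidar_pipeline_3/library/point_classifier.py | map_segments
-- ===== SOURCE A (Python) =====
-- def bisect_left(a, x, lo=0, hi=None, *, key=None):
--     """Return the index where to insert item x in list a, assuming a is sorted.
--
--     The return value i is such that all e in a[:i] have e < x, and all e in
--     a[i:] have e >= x.  So if x already appears in the list, a.insert(i, x) will
--     insert just before the leftmost x already there.
--
--     Optional args lo (default 0) and hi (default len(a)) bound the
--     slice of a to be searched.
--     """
--
--     if lo < 0:
--         raise ValueError("lo must be non-negative")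
--     if hi is None:
--         hi = len(a)
--     # Note, the comparison uses "<" to match the
--     # __lt__() logic in list.sort() and in heapq.
--     if key is None:
--         while lo < hi:
--             mid = (lo + hi) // 2
--             if a[mid] < x:
--                 lo = mid + 1
--             else:
--                 hi = mid
--     else:
--         while lo < hi:
--             mid = (lo + hi) // 2
--             if key(a[mid]) < x:
--                 lo = mid + 1
--             else:
--                 hi = mid
--     return lo
--
-- def take_closest(myList, myNumber):
--     """
--     Assumes myList is sorted. Returns closest value to myNumber.
--
--     If two numbers are equally close, return the smallest number.
--     """
--     pos = bisect_left(myList, myNumber)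
--     if pos == 0:
--         return myList[0]
--     if pos == len(myList):
--         return myList[-1]
--     before = myList[pos - 1]
--     after = myList[pos]
--     if after - myNumber < myNumber - before:
--         return after
--     else:
--         return before
--
-- def map_segments(ground_plane, SEGMENT_COUNT):
--     # Indices of segments without ground lines
--     empty_segments = [idx for idx, lines in enumerate(ground_plane) if not lines]
--
--     # Indices of segments with ground lines
--     non_empty_segments = [idx for idx, lines in enumerate(ground_plane) if lines]
--
--     # [0, 1, ..., 126, 127]
--     segments_full = list(range(SEGMENT_COUNT))
--     for empty_segment in empty_segments:
--         closest_idx = take_closest(non_empty_segments, empty_segment)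
--         segments_full[empty_segment] = closest_idx
--
--     return segments_full
-- ===== SOURCE B (Python) =====
-- def map_segments(ground_plane, SEGMENT_COUNT):
--     # One linear sweep each way instead of per-segment binary search:
--     # prev[i] / nxt[i] hold the nearest non-empty segment index at or before /
--     # at or after i; ties go to the smaller index.
--     n = len(ground_plane)
--
--     prev = []
--     p = None
--     for i in range(n):
--         if ground_plane[i]:
--             p = i
--         prev.append(p)
--
--     nxt = []
--     q = None
--     for i in range(n - 1, -1, -1):
--         if ground_plane[i]:
--             q = i
--         nxt.append(q)
--     nxt.reverse()
--
--     out = []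
--     for k in range(SEGMENT_COUNT):
--         if k < n and not ground_plane[k]:
--             p, q = prev[k], nxt[k]
--             if p is None:
--                 out.append(q)
--             elif q is None or k - p <= q - k:
--                 out.append(p)
--             else:
--                 out.append(q)
--         else:
--             out.append(k)
--     return out
-- ===== Notes on version B (the rewrite author's own statement) =====
-- stated objective: alternative
-- what changed: A binary-searches the sorted list of non-empty segment indices (take_closest/bisect_left) once per empty segment; B instead precomputes with two linear sweeps the nearest non-empty index on each side of every position and picks the closer one (tie to the smaller) in a single output pass.
-- outside the precondition, e.g. on map_segments([[], []], 2): A raises IndexError, B returns [None, None]; on map_segments([[1], []], 1): A raises IndexError, B returns [0]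
import Mathlib
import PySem

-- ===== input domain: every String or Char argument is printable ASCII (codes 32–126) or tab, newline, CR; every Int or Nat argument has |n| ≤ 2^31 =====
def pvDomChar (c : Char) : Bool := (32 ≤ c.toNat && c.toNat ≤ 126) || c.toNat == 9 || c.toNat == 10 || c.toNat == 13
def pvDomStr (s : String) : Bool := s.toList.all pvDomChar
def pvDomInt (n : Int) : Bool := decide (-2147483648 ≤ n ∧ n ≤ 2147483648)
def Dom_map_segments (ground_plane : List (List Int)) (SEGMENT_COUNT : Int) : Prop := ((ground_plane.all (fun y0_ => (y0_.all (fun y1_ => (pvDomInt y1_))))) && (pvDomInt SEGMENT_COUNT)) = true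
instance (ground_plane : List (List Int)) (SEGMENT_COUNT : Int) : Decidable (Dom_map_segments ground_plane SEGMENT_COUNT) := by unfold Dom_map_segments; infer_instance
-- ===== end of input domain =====

-- B replaces A's per-empty-segment binary search (take_closest/bisect_left) by two linear prev/next sweeps (objective: alternative algorithm, same cost on typical inputs).

-- ===== PORT A =====
-- `segments_full[e] = v` (list item assignment); the out-of-range branch (Python IndexError)
-- is unreachable under Pre_map_segments, where it returns the list unchanged.
def pySetIdxA (xs : List Int) (i : Int) (v : Int) : List Int :=
  if 0 ≤ i ∧ i.toNat < xs.length then xs.set i.toNat v else xs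

-- A's take_closest; its bisect_left is the vendored stdlib bisect_left = PySem.List.bisectLeft.
-- `.getD 0` marks Python's IndexError on `myList[0]` with an empty list (unreachable under Pre_);
-- the other three accesses are always in range.
def tcTakeClosest (myList : List Int) (myNumber : Int) : Int :=
  let pos := PySem.List.bisectLeft myList myNumber
  if pos = 0 then (PySem.List.pyGet? myList 0).getD 0
  else if pos = myList.length then (PySem.List.pyGet? myList (-1)).getD 0
  else
    let before := (PySem.List.pyGet? myList ((pos : Int) - 1)).getD 0
    let after := (PySem.List.pyGet? myList (pos : Int)).getD 0
    if after - myNumber < myNumber - before then after else before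

def map_segments (ground_plane : List (List Int)) (SEGMENT_COUNT : Int) : List Int :=
  let empty_segments := ((PySem.List.enumerate ground_plane).filter (fun p => p.2.isEmpty)).map Prod.fst
  let non_empty_segments := ((PySem.List.enumerate ground_plane).filter (fun p => !p.2.isEmpty)).map Prod.fst
  let segments_full := PySem.List.pyRange 0 SEGMENT_COUNT
  empty_segments.foldl (fun acc e => pySetIdxA acc e (tcTakeClosest non_empty_segments e)) segments_full

-- ===== PORT B =====
-- Transliteration of Source B: a forward sweep building prev, a backward sweep building nxt
-- (appended then reversed, as in Source B), then one pass over range(SEGMENT_COUNT) appending the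
-- output.  `ground_plane[i]` with 0 ≤ i < n is pyGetD; `(….getD 0)` marks Source B appending None
-- (only when there is no non-empty segment at all, unreachable under Pre_).
def map_segments_alt (ground_plane : List (List Int)) (SEGMENT_COUNT : Int) : List Int :=
  let n := ground_plane.length
  let prev := ((List.range n).foldl
      (fun (st : Option Int × List (Option Int)) i =>
        let p := if (ground_plane.getD i []).isEmpty then st.1 else some (i : Int)
        (p, st.2 ++ [p])) (none, [])).2
  let nxt := (((List.range n).reverse.foldl
      (fun (st : Option Int × List (Option Int)) i =>
        let q := if (ground_plane.getD i []).isEmpty then st.1 else some (i : Int)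
        (q, st.2 ++ [q])) (none, [])).2).reverse
  (PySem.List.pyRange 0 SEGMENT_COUNT).foldl
    (fun acc k =>
      acc ++ [ if k < (n : Int) ∧ (PySem.List.pyGetD ground_plane k []).isEmpty then
                 match PySem.List.pyGetD prev k none with
                 | none => (PySem.List.pyGetD nxt k none).getD 0
                 | some p =>
                   match PySem.List.pyGetD nxt k none with
                   | none => p
                   | some q => if k - p ≤ q - k then p else q
               else k ]) []

-- ===== PRECONDITION & SPEC =====
-- Pre_ excludes exactly the inputs where Python A raises: an empty segment with no non-empty
-- segment anywhere (take_closest does myList[0] on []), and an empty segment index ≥ SEGMENT_COUNT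
-- (segments_full[empty_segment] is an IndexError).
def Pre_map_segments (ground_plane : List (List Int)) (SEGMENT_COUNT : Int) : Prop :=
  ((∃ l ∈ ground_plane, l = []) → (∃ l ∈ ground_plane, l ≠ [])) ∧
  ∀ i ∈ List.range ground_plane.length, ground_plane.getD i [] = [] → (i : Int) < SEGMENT_COUNT

instance (ground_plane : List (List Int)) (SEGMENT_COUNT : Int) : Decidable (Pre_map_segments ground_plane SEGMENT_COUNT) := by unfold Pre_map_segments; infer_instance

def pvWitness_map_segments : List (List Int) × Int := ([[1], [], [2, 3]], 3)

def Spec_map_segments (ground_plane : List (List Int)) (SEGMENT_COUNT : Int) (out : List Int) : Prop := out = map_segments_alt ground_plane SEGMENT_COUNT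
instance (ground_plane : List (List Int)) (SEGMENT_COUNT : Int) (out : List Int) : Decidable (Spec_map_segments ground_plane SEGMENT_COUNT out) := by unfold Spec_map_segments; infer_instance

-- ===== CLAIM (what is proved, stated in full; the proofs are below) =====
def Claim_equal_map_segments : Prop := ∀ (ground_plane : List (List Int)) (SEGMENT_COUNT : Int), Dom_map_segments ground_plane SEGMENT_COUNT → Pre_map_segments ground_plane SEGMENT_COUNT → Spec_map_segments ground_plane SEGMENT_COUNT (map_segments ground_plane SEGMENT_COUNT)

-- ===== LEMMAS AND PROOFS =====

-- indices i of gp (offset by s) with (gp[i]).isEmpty = b, in order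
def idxFrom (b : Bool) : List (List Int) → Int → List Int
  | [], _ => []
  | l :: t, s => (if l.isEmpty = b then [s] else []) ++ idxFrom b t (s + 1)

theorem enum_filter_eq (b : Bool) (gp : List (List Int)) (s : Int) :
    (((PySem.List.enumerate gp s).filter (fun p => p.2.isEmpty == b)).map Prod.fst) = idxFrom b gp s := by
  induction gp generalizing s with
  | nil => simp [PySem.List.enumerate, idxFrom]
  | cons l t ih => by_cases h : l.isEmpty = b <;> simp [PySem.List.enumerate, idxFrom, h, ih]

theorem mem_idxFrom (b : Bool) (gp : List (List Int)) (s : Int) (x : Int) :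
    x ∈ idxFrom b gp s ↔ ∃ i : Nat, i < gp.length ∧ x = s + i ∧ (gp.getD i []).isEmpty = b := by
  induction gp generalizing s with
  | nil => simp [idxFrom]
  | cons l t ih =>
    simp only [idxFrom, List.mem_append, ih]
    constructor
    · rintro (h | ⟨i, hi, hx, hb⟩)
      · simp at h
        exact ⟨0, by simp, by simp [h.2], by simpa using h.1⟩
      · exact ⟨i + 1, by simpa using hi, by push_cast; omega, by simpa using hb⟩
    · rintro ⟨i, hi, hx, hb⟩
      cases i with
      | zero =>
        left
        simp at hb
        simp [hb]
        omega
      | succ i =>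
        right
        exact ⟨i, by simpa using hi, by push_cast at hx ⊢; omega, by simpa using hb⟩

theorem sorted_idxFrom (b : Bool) (gp : List (List Int)) (s : Int) :
    List.Pairwise (· < ·) (idxFrom b gp s) := by
  induction gp generalizing s with
  | nil => simp [idxFrom]
  | cons l t ih =>
    simp only [idxFrom, List.pairwise_append]
    refine ⟨by split <;> simp, ih (s + 1), ?_⟩
    intro a ha c hc
    have ha' : a = s := by split at ha <;> simp at ha; exact ha
    rcases (mem_idxFrom b t (s + 1) c).1 hc with ⟨i, _, hx, _⟩
    omega

-- nearest non-empty index < m (the forward sweep's running state)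
def prevSpec (gp : List (List Int)) : Nat → Option Int
  | 0 => none
  | m + 1 => if (gp.getD m []).isEmpty then prevSpec gp m else some (m : Int)

theorem prev_fold (gp : List (List Int)) (m : Nat) :
    (List.range m).foldl (fun (st : Option Int × List (Option Int)) i =>
        let p := if (gp.getD i []).isEmpty then st.1 else some (i : Int)
        (p, st.2 ++ [p])) (none, [])
      = (prevSpec gp m, (List.range m).map (fun k => prevSpec gp (k + 1))) := by
  induction m with
  | zero => rfl
  | succ m ih =>
    rw [List.range_succ, List.foldl_append, ih]
    simp only [List.foldl_cons, List.foldl_nil, List.map_append, List.map_cons, List.map_nil]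
    show ((if (gp.getD m []).isEmpty then prevSpec gp m else some (m : Int)), _) = _
    rw [show (if (gp.getD m []).isEmpty then prevSpec gp m else some (m : Int)) = prevSpec gp (m + 1) from rfl]

-- the backward sweep's running state after processing indices m-1 … j, started at q0
def nb (gp : List (List Int)) (q0 : Option Int) : Nat → Nat → Option Int
  | 0, _ => q0
  | m + 1, j => if m + 1 ≤ j then q0
      else nb gp (if (gp.getD m []).isEmpty then q0 else some (m : Int)) m j

theorem nb_succ_eq (gp : List (List Int)) (q0 : Option Int) (m j : Nat) :
    nb gp q0 (m + 1) j
      = if m + 1 ≤ j then q0 else nb gp (if (gp.getD m []).isEmpty then q0 else some (m : Int)) m j := rfl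

theorem nb_of_le (gp : List (List Int)) (q0 : Option Int) (m j : Nat) (h : m ≤ j) :
    nb gp q0 m j = q0 := by
  cases m with
  | zero => rfl
  | succ m => rw [nb_succ_eq, if_pos h]

theorem nxt_fold (gp : List (List Int)) (m : Nat) (q0 : Option Int) (acc : List (Option Int)) :
    ((List.range m).reverse).foldl (fun (st : Option Int × List (Option Int)) i =>
        let q := if (gp.getD i []).isEmpty then st.1 else some (i : Int)
        (q, st.2 ++ [q])) (q0, acc)
      = (nb gp q0 m 0, acc ++ ((List.range m).reverse).map (fun j => nb gp q0 m j)) := by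
  induction m generalizing q0 acc with
  | zero => simp [nb]
  | succ m ih =>
    have hrev : (List.range (m + 1)).reverse = m :: (List.range m).reverse := by
      rw [List.range_succ, List.reverse_append]; rfl
    rw [hrev]
    simp only [List.foldl_cons]
    rw [ih]
    have h0 : nb gp q0 (m + 1) 0 = nb gp (if (gp.getD m []).isEmpty then q0 else some (m : Int)) m 0 := by
      rw [nb_succ_eq, if_neg (by omega)]
    have hm : nb gp q0 (m + 1) m = (if (gp.getD m []).isEmpty then q0 else some (m : Int)) := by
      rw [nb_succ_eq, if_neg (by omega), nb_of_le gp _ m m le_rfl]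
    have htail : ((List.range m).reverse).map
          (fun j => nb gp (if (gp.getD m []).isEmpty then q0 else some (m : Int)) m j)
        = ((List.range m).reverse).map (fun j => nb gp q0 (m + 1) j) := by
      apply List.map_congr_left
      intro j hj
      simp only [List.mem_reverse, List.mem_range] at hj
      conv_rhs => rw [nb_succ_eq]
      rw [if_neg (show ¬ (m + 1 ≤ j) by omega)]
    rw [htail]
    rw [List.map_cons, hm, ← h0]
    simp

theorem nb_all_empty (gp : List (List Int)) (q0 : Option Int) (m j : Nat)
    (h : ∀ i, j ≤ i → i < m → (gp.getD i []).isEmpty) : nb gp q0 m j = q0 := by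
  induction m generalizing q0 with
  | zero => rfl
  | succ m ih =>
    rw [nb_succ_eq]
    by_cases hj : m + 1 ≤ j
    · rw [if_pos hj]
    · rw [if_neg hj, if_pos (h m (by omega) (by omega))]
      exact ih q0 (fun i h1 h2 => h i h1 (by omega))

theorem nb_least (gp : List (List Int)) (q0 : Option Int) (m j i0 : Nat)
    (hji : j ≤ i0) (hi0 : i0 < m) (hne : ¬ (gp.getD i0 []).isEmpty)
    (hleast : ∀ i, j ≤ i → i < i0 → (gp.getD i []).isEmpty) :
    nb gp q0 m j = some (i0 : Int) := by
  induction m generalizing q0 with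
  | zero => omega
  | succ m ih =>
    rw [nb_succ_eq, if_neg (by omega)]
    by_cases hm : i0 = m
    · subst hm
      rw [if_neg hne]
      exact nb_all_empty gp _ i0 j hleast
    · exact ih _ (by omega)

theorem prevSpec_all_empty (gp : List (List Int)) (m : Nat)
    (h : ∀ i, i < m → (gp.getD i []).isEmpty) : prevSpec gp m = none := by
  induction m with
  | zero => rfl
  | succ m ih =>
    show (if (gp.getD m []).isEmpty then prevSpec gp m else some (m : Int)) = none
    rw [if_pos (h m (by omega))]
    exact ih (fun i hi => h i (by omega))

theorem prevSpec_greatest (gp : List (List Int)) (m i0 : Nat)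
    (hi0 : i0 < m) (hne : ¬ (gp.getD i0 []).isEmpty)
    (hgr : ∀ i, i0 < i → i < m → (gp.getD i []).isEmpty) :
    prevSpec gp m = some (i0 : Int) := by
  induction m with
  | zero => omega
  | succ m ih =>
    show (if (gp.getD m []).isEmpty then prevSpec gp m else some (m : Int)) = some (i0 : Int)
    by_cases hm : i0 = m
    · subst hm; rw [if_neg hne]
    · rw [if_pos (hgr m (by omega) (by omega))]
      exact ih (by omega) (fun i h1 h2 => hgr i h1 (by omega))

theorem foldl_set_len (g : Int → Int) (exs base : List Int) :
    (exs.foldl (fun acc e => pySetIdxA acc e (g e)) base).length = base.length := by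
  induction exs generalizing base with
  | nil => rfl
  | cons e t ih =>
    rw [List.foldl_cons, ih]
    unfold pySetIdxA
    split <;> simp

theorem foldl_set_get (g : Int → Int) (exs base : List Int) (j : Nat) (hj : j < base.length) :
    (exs.foldl (fun acc e => pySetIdxA acc e (g e)) base).getD j 0
      = if (j : Int) ∈ exs then g (j : Int) else base.getD j 0 := by
  induction exs generalizing base with
  | nil => simp
  | cons e t ih =>
    rw [List.foldl_cons]
    have hlen : (pySetIdxA base e (g e)).length = base.length := by
      unfold pySetIdxA; split <;> simp
    rw [ih (pySetIdxA base e (g e)) (by rw [hlen]; exact hj)]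
    have hget : (pySetIdxA base e (g e)).getD j 0
        = if e = (j : Int) then g e else base.getD j 0 := by
      unfold pySetIdxA
      by_cases hc : 0 ≤ e ∧ e.toNat < base.length
      · rw [if_pos hc]
        by_cases he : e = (j : Int)
        · rw [if_pos he]
          have : e.toNat = j := by omega
          simp [List.getD, this, hj]
        · rw [if_neg he]
          have : e.toNat ≠ j := by omega
          simp [List.getD, this]
      · rw [if_neg hc]
        rw [if_neg (by intro he; exact hc ⟨by omega, by omega⟩)]
    by_cases h1 : (j : Int) ∈ t
    · rw [if_pos h1, if_pos (List.mem_cons_of_mem e h1)]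
    · rw [if_neg h1, hget]
      by_cases h2 : e = (j : Int)
      · rw [if_pos h2, if_pos (by rw [← h2]; exact List.mem_cons_self ..), h2]
      · rw [if_neg h2, if_neg (by simp [List.mem_cons, h1]; omega)]

theorem pyRange_zero_toNat (S : Int) :
    PySem.List.pyRange 0 S = (List.range S.toNat).map (fun k : Nat => (k : Int)) := by
  by_cases h : 0 < S
  · have hS : S = (S.toNat : Int) := by omega
    conv_lhs => rw [hS]
    rw [PySem.List.pyRange_zero_natCast]
  · have h1 : S.toNat = 0 := by omega
    simp [PySem.List.pyRange, h1, h]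

-- the per-empty-segment value computed by A equals the prev/nxt choice computed by B
theorem point_eq (gp : List (List Int)) (j : Nat) (hj : j < gp.length)
    (hemp : (gp.getD j []).isEmpty) (hne : idxFrom false gp 0 ≠ []) :
    tcTakeClosest (idxFrom false gp 0) (j : Int)
      = (match prevSpec gp (j + 1) with
         | none => (nb gp none gp.length j).getD 0
         | some p =>
           match nb gp none gp.length j with
           | none => p
           | some q => if (j : Int) - p ≤ q - (j : Int) then p else q) := by
  set ne := idxFrom false gp 0 with hnedef
  have hmem : ∀ x, x ∈ ne ↔ ∃ i : Nat, i < gp.length ∧ x = (i : Int) ∧ (gp.getD i []).isEmpty = false := by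
    intro x; rw [hnedef, mem_idxFrom]; simp
  have hsorted : List.Pairwise (· < ·) ne := sorted_idxFrom false gp 0
  have hpair : ∀ a b (hab : a < b) (hb : b < ne.length), ne[a]'(by omega) < ne[b] := by
    intro a b hab hb
    exact List.pairwise_iff_getElem.mp hsorted a b (by omega) hb hab
  obtain ⟨hrle, hlt, hge⟩ := PySem.List.bisectLeft_spec ne (j : Int) (hsorted.imp (fun h => le_of_lt h))
  set r := PySem.List.bisectLeft ne (j : Int) with hrdef
  have hnotmem : ∀ jj (h : jj < ne.length), ne[jj] ≠ (j : Int) := by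
    intro jj h heq
    obtain ⟨i, hi, hxi, hie⟩ := (hmem ne[jj]).1 (List.getElem_mem h)
    have hij : i = j := by omega
    rw [hij, hemp] at hie
    exact absurd hie (by decide)
  have hgt : ∀ jj (h : jj < ne.length), r ≤ jj → (j : Int) < ne[jj] := by
    intro jj h hr
    have h1 := hge jj h hr
    have h2 := hnotmem jj h
    omega
  have hfind : ∀ i : Nat, i < gp.length → (gp.getD i []).isEmpty = false →
      ∃ jj, ∃ h : jj < ne.length, ne[jj] = (i : Int) := by
    intro i hi hie
    have : (i : Int) ∈ ne := (hmem _).2 ⟨i, hi, rfl, hie⟩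
    obtain ⟨jj, h, he⟩ := List.mem_iff_getElem.mp this
    exact ⟨jj, h, he⟩
  have hlen0 : 0 < ne.length := List.length_pos_iff.mpr hne
  have hC1 : prevSpec gp (j + 1) = if h0 : r = 0 then none else some (ne[r - 1]'(by omega)) := by
    by_cases h0 : r = 0
    · rw [dif_pos h0]
      apply prevSpec_all_empty
      intro i hi
      by_contra hie
      have hie' : (gp.getD i []).isEmpty = false := by simpa using hie
      obtain ⟨jj, hjj, he⟩ := hfind i (by omega) hie'
      have := hgt jj hjj (by omega)
      omega
    · rw [dif_neg h0]
      have hr1 : r - 1 < ne.length := by omega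
      obtain ⟨i0, hi0l, hxi0, hi0e⟩ := (hmem (ne[r - 1]'hr1)).1 (List.getElem_mem hr1)
      have hlt0 : ne[r - 1]'hr1 < (j : Int) := hlt (r - 1) hr1 (by omega)
      rw [hxi0]
      apply prevSpec_greatest gp (j + 1) i0 (by omega) (by intro h; rw [h] at hi0e; exact absurd hi0e (by decide))
      intro i h1 h2
      by_contra hie
      have hie' : (gp.getD i []).isEmpty = false := by simpa using hie
      obtain ⟨jj, hjj, he⟩ := hfind i (by omega) hie'
      have hij : i ≠ j := by
        intro hh; rw [hh, hemp] at hie'; exact absurd hie' (by decide)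
      have hjjr : jj < r := by
        by_contra hge2
        have := hgt jj hjj (by omega)
        omega
      have hle1 : ne[jj] ≤ ne[r - 1]'hr1 := by
        rcases Nat.lt_or_ge jj (r - 1) with hh | hh
        · exact le_of_lt (hpair jj (r - 1) hh hr1)
        · have he2 : ne[jj] = ne[r - 1]'hr1 := by congr 1; omega
          exact le_of_eq he2
      omega
  have hC2 : nb gp none gp.length j = if hL : r = ne.length then none else some (ne[r]'(by omega)) := by
    by_cases hL : r = ne.length
    · rw [dif_pos hL]
      apply nb_all_empty
      intro i h1 h2
      by_contra hie
      have hie' : (gp.getD i []).isEmpty = false := by simpa using hie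
      obtain ⟨jj, hjj, he⟩ := hfind i h2 hie'
      have := hlt jj hjj (by omega)
      omega
    · rw [dif_neg hL]
      have hr : r < ne.length := by omega
      obtain ⟨i0, hi0l, hxi0, hi0e⟩ := (hmem (ne[r]'hr)).1 (List.getElem_mem hr)
      have hgt0 : (j : Int) < ne[r]'hr := hgt r hr le_rfl
      rw [hxi0]
      apply nb_least gp none gp.length j i0 (by omega) hi0l (by intro h; rw [h] at hi0e; exact absurd hi0e (by decide))
      intro i h1 h2
      by_contra hie
      have hie' : (gp.getD i []).isEmpty = false := by simpa using hie
      obtain ⟨jj, hjj, he⟩ := hfind i (by omega) hie'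
      have hjjr : jj < r := by
        by_contra hh
        have hle2 : ne[r]'hr ≤ ne[jj] := by
          rcases Nat.lt_or_ge r jj with hcc | hcc
          · exact le_of_lt (hpair r jj hcc hjj)
          · have he2 : ne[r]'hr = ne[jj] := by congr 1; omega
            exact le_of_eq he2
        omega
      have := hlt jj hjj hjjr
      omega
  unfold tcTakeClosest
  rw [← hrdef]
  by_cases h0 : r = 0
  · rw [if_pos h0]
    have hL : r ≠ ne.length := by omega
    rw [hC1, hC2, dif_pos h0, dif_neg hL]
    have hg0 : PySem.List.pyGet? ne 0 = some (ne[0]'hlen0) := by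
      have := show PySem.List.pyGet? ne (((0 : Nat)) : Int) = some (ne[0]'hlen0) by
        simp [pysem, hlen0]
      simpa using this
    rw [hg0]
    show ne[0]'hlen0 = ne[r]'(by omega)
    congr 1; omega
  · rw [if_neg h0]
    by_cases hL : r = ne.length
    · rw [if_pos hL, hC1, hC2, dif_neg h0, dif_pos hL]
      have hgl : PySem.List.pyGet? ne (-1) = some (ne[ne.length - 1]'(by omega)) := by
        have h1 : ¬ ((0 : Int) ≤ -1) := by omega
        have h2 : -(ne.length : Int) ≤ -1 := by omega
        simp only [PySem.List.pyGet?, PySem.List.pyIdx?, if_neg h1, if_pos h2]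
        show ne[ne.length - (1 : Int).toNat]? = _
        rw [List.getElem?_eq_getElem (by omega)]
        norm_num
      rw [hgl]
      show ne[ne.length - 1]'(by omega) = ne[r - 1]'(by omega)
      congr 1; omega
    · rw [if_neg hL, hC1, hC2, dif_neg h0, dif_neg hL]
      have hr : r < ne.length := by omega
      have hga : PySem.List.pyGet? ne ((r : Int)) = some (ne[r]'hr) := by
        simp [pysem, hr]
      have hgb : PySem.List.pyGet? ne ((r : Int) - 1) = some (ne[r - 1]'(by omega)) := by
        rw [show ((r : Int) - 1) = ((r - 1 : Nat) : Int) by omega]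
        simp [pysem, show r - 1 < ne.length by omega]
      rw [hga, hgb]
      show (if ne[r]'hr - (j : Int) < (j : Int) - ne[r - 1]'(by omega) then ne[r]'hr else ne[r - 1]'(by omega))
          = (if (j : Int) - ne[r - 1]'(by omega) ≤ ne[r]'hr - (j : Int) then ne[r - 1]'(by omega) else ne[r]'hr)
      by_cases hcmp : ne[r]'hr - (j : Int) < (j : Int) - ne[r - 1]'(by omega)
      · rw [if_pos hcmp, if_neg (by omega)]
      · rw [if_neg hcmp, if_pos (by omega)]

theorem map_segments_main (gp : List (List Int)) (S : Int)
    (hPre : Pre_map_segments gp S) :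
    map_segments gp S = map_segments_alt gp S := by
  obtain ⟨hPre1, _hPre2⟩ := hPre
  simp only [map_segments, map_segments_alt]
  have h1 : (fun p : Int × List Int => p.2.isEmpty) = (fun p : Int × List Int => p.2.isEmpty == true) := by
    funext p; cases p.2.isEmpty <;> rfl
  have h2 : (fun p : Int × List Int => !p.2.isEmpty) = (fun p : Int × List Int => p.2.isEmpty == false) := by
    funext p; cases p.2.isEmpty <;> rfl
  rw [h1, h2, enum_filter_eq, enum_filter_eq, prev_fold, nxt_fold, pyRange_zero_toNat,
    PySem.List.foldl_append_singleton_eq_map, List.nil_append, List.nil_append]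
  rw [List.map_reverse, List.reverse_reverse]
  set n := gp.length with hndef
  set ne := idxFrom false gp 0 with hnedef
  set prevlist := (List.range n).map (fun k => prevSpec gp (k + 1)) with hprevdef
  set nxtlist := (List.range n).map (fun j => nb gp none n j) with hnxtdef
  apply List.ext_getElem
  · rw [foldl_set_len]; simp
  intro j hjA hjB
  have hjS : j < S.toNat := by
    have := hjA; rw [foldl_set_len] at this; simpa using this
  have hbaseget : ((List.range S.toNat).map (fun k : Nat => (k : Int))).getD j 0 = (j : Int) := by
    rw [List.getD_eq_getElem _ _ (by simpa using hjS)]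
    simp
  rw [← List.getD_eq_getElem _ 0 hjA,
    foldl_set_get _ _ _ j (by simpa using hjS), hbaseget]
  rw [List.getElem_map, List.getElem_map, List.getElem_range]
  have hmemt : ((j : Int) ∈ idxFrom true gp 0) ↔ (j < n ∧ (gp.getD j []).isEmpty) := by
    rw [mem_idxFrom]
    constructor
    · rintro ⟨i, hi, hx, hb⟩
      have : i = j := by omega
      subst this
      exact ⟨hi, by simpa using hb⟩
    · rintro ⟨hjn, hb⟩
      exact ⟨j, hjn, by omega, by simpa using hb⟩
  have hgpget : PySem.List.pyGetD gp (j : Int) [] = gp.getD j [] := PySem.List.pyGetD_natCast gp j []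
  by_cases hc : j < n ∧ (gp.getD j []).isEmpty
  · -- j is an empty segment index
    have hprevlook : PySem.List.pyGetD prevlist (j : Int) none = prevSpec gp (j + 1) := by
      rw [PySem.List.pyGetD_natCast, hprevdef,
        List.getD_eq_getElem _ _ (by simpa using hc.1)]
      simp
    have hnxtlook : PySem.List.pyGetD nxtlist (j : Int) none = nb gp none n j := by
      rw [PySem.List.pyGetD_natCast, hnxtdef,
        List.getD_eq_getElem _ _ (by simpa using hc.1)]
      simp
    have hnenil : ne ≠ [] := by
      have hex : ∃ l ∈ gp, l = [] := by
        refine ⟨gp.getD j [], ?_, by simpa [List.isEmpty_iff] using hc.2⟩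
        rw [List.getD_eq_getElem _ _ hc.1]
        exact List.getElem_mem hc.1
      obtain ⟨l, hl, hlne⟩ := hPre1 hex
      obtain ⟨i, hi, hli⟩ := List.mem_iff_getElem.mp hl
      have : (i : Int) ∈ ne := by
        rw [hnedef, mem_idxFrom]
        refine ⟨i, hi, by omega, ?_⟩
        rw [List.getD_eq_getElem _ _ hi, hli]
        simpa [List.isEmpty_iff] using hlne
      exact List.ne_nil_of_mem this
    rw [if_pos (hmemt.mpr hc),
      if_pos (by rw [hgpget]; exact ⟨by exact_mod_cast hc.1, hc.2⟩)]
    rw [hprevlook, hnxtlook]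
    exact point_eq gp j hc.1 hc.2 hnenil
  · rw [if_neg (fun hm => hc (hmemt.mp hm)),
      if_neg (by rw [hgpget]; intro hh; exact hc ⟨by exact_mod_cast hh.1, hh.2⟩)]

-- ===== VERDICT (by name: the statement is the Claim_ definition above) =====
theorem map_segments_spec : Claim_equal_map_segments := by
  intro gp S _hDom hPre
  unfold Spec_map_segments
  exact map_segments_main gp S hPre
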